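-- pv_equiv track=rewrite | github.com/leo19900723/GetWebpages | TEST.py | compute_number_score
-- ===== SOURCE A (Python) =====
-- def compute_number_score(number):
--     ans = 4 if not number % 3 else 0
--     number = str(number)
--     c2PointerLeft, c2PointerRight = None, None
--     powPointer, powLength = 0, 1
--
--     for charIndex in range(len(number)):
--         if number[charIndex] == "7":
--             ans += 5
--
--         if number[charIndex] == "2":
--             if c2PointerLeft is None:
--                 c2PointerLeft = charIndex
--             else:
--                 c2PointerRight = charIndex
--         else:
--             if c2PointerLeft and c2PointerRight:
--                 ans += 6 * (c2PointerRight - c2PointerLeft)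
--             c2PointerLeft, c2PointerRight = None, None
--
--         if int(number[powPointer]) - int(number[charIndex]) == 1:
--             powLength += 1
--         elif charIndex:
--             ans += powLength ** 2
--             powLength = 1
--
--         powPointer = charIndex
--
--         if not int(number[charIndex]) % 2:
--             ans += 3
--
--     if c2PointerLeft is not None and c2PointerRight is not None:
--         ans += 6 * (c2PointerRight - c2PointerLeft)
--     ans += powLength ** 2
--
--     return ans
-- ===== SOURCE B (Python) =====
-- def compute_number_score(number):
--     ans = 4 if number % 3 == 0 else 0
--     s = str(number)
--     digits = [int(c) for c in s]
--     n = len(s)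
--     # 5 per '7', 3 per even digit
--     ans += 5 * s.count('7')
--     ans += 3 * sum(1 for d in digits if d % 2 == 0)
--     # 6 * (length - 1) per maximal run of consecutive '2's
--     i = 0
--     while i < n:
--         if s[i] == '2':
--             j = i
--             while j + 1 < n and s[j + 1] == '2':
--                 j += 1
--             if j > i:
--                 ans += 6 * (j - i)
--             i = j + 1
--         else:
--             i += 1
--     # square of the length of each maximal run of descending-by-one digits
--     run = 1
--     for k in range(1, n):
--         if digits[k - 1] - digits[k] == 1:
--             run += 1
--         else:
--             ans += run * run
--             run = 1
--     ans += run * run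
--     return ans
-- ===== Notes on version B (the rewrite author's own statement) =====
-- stated objective: alternative
-- what changed: A fuses all scoring rules into one stateful loop (two option pointers for runs of twos, a lagging index for descending runs); B computes each rule in its own pass: a counting pass for sevens and even digits, a run-jumping scan over maximal runs of twos, and an adjacent-pair pass for descending runs.
-- intended difference: On numbers whose decimal form starts with a run of at least two twos that does not cover the whole string, A's falsy check of c2PointerLeft at index zero silently drops that run's bonus of six per extra two, so A returns a lower score; B scores every maximal run of twos uniformly, which is the evident intent. — e.g. on compute_number_score(221): A returns 11, B returns 17
import Mathlib
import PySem

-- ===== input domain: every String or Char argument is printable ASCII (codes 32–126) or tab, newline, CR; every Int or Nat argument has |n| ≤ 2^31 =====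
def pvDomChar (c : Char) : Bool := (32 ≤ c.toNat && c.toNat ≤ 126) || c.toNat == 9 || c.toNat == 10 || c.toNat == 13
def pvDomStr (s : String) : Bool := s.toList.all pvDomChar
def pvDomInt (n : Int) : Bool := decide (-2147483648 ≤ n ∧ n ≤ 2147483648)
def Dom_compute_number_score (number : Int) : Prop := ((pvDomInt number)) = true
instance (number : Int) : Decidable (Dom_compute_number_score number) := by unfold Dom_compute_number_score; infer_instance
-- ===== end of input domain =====

-- B scores each rule in its own pass instead of A's single fused stateful loop; same cost,
-- different decomposition. Return-value equivalence outside D_ (A drops one 2-run bonus there).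

-- ===== PORT A =====
-- int(ch) on a single char: exact for digit chars '0'..'9' (Python raises ValueError on others,
-- which only occur for negative `number`, excluded by Pre_).
def pyDigit (c : Char) : Int := (c.toNat : Int) - 48

-- Python truthiness flush: `if c2PointerLeft and c2PointerRight: ans += 6*(right-left)` (0 and None falsy)
def flushMid : Option Nat → Option Nat → Int
  | some l, some r => if l ≠ 0 ∧ r ≠ 0 then 6 * ((r : Int) - (l : Int)) else 0
  | _, _ => 0

-- final flush: `if c2PointerLeft is not None and c2PointerRight is not None`
def flushEnd : Option Nat → Option Nat → Int
  | some l, some r => 6 * ((r : Int) - (l : Int))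
  | _, _ => 0

-- the `if c2PointerLeft is None: left = i / else: right = i` update of A's '2' branch
def upd2L (c2L : Option Nat) (i : Nat) : Option Nat :=
  match c2L with | none => some i | some l => some l
def upd2R (c2L c2R : Option Nat) (i : Nat) : Option Nat :=
  match c2L with | none => c2R | some _ => some i

-- the single for-loop of A, carried state: ans, c2PointerLeft, c2PointerRight, powPointer, powLength
def csLoopA (s : List Char) (i : Nat) (ans : Int) (c2L c2R : Option Nat) (pp : Nat) (pl : Int) : Int :=
  if h : i < s.length then
    let c := s[i]
    let ans1 := if c = '7' then ans + 5 else ans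
    let ans2 := if c = '2' then ans1 else ans1 + flushMid c2L c2R
    let c2L' : Option Nat := if c = '2' then upd2L c2L i else none
    let c2R' : Option Nat := if c = '2' then upd2R c2L c2R i else none
    let cond := pyDigit (s.getD pp ' ') - pyDigit c = 1
    let ans3 := if cond then ans2 else if i ≠ 0 then ans2 + pl ^ 2 else ans2
    let pl' := if cond then pl + 1 else if i ≠ 0 then 1 else pl
    let ans4 := if PySem.Int.mod (pyDigit c) 2 = 0 then ans3 + 3 else ans3
    csLoopA s (i + 1) ans4 c2L' c2R' i pl'
  else
    ans + flushEnd c2L c2R + pl ^ 2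
termination_by s.length - i

def compute_number_score (number : Int) : Int :=
  let ans : Int := if PySem.Int.mod number 3 = 0 then 4 else 0
  let s := PySem.Int.toChars number
  csLoopA s 0 ans none none 0 1

-- ===== PORT B =====
-- inner `while j + 1 < n and s[j+1] == '2'` of B's 2-run pass: end index of the run starting at j
def csAltRunEnd (s : List Char) (j : Nat) : Nat :=
  if h : j + 1 < s.length then
    if s[j + 1] = '2' then csAltRunEnd s (j + 1) else j
  else j
termination_by s.length - j

theorem csAltRunEnd_ge (s : List Char) (j : Nat) : j ≤ csAltRunEnd s j := by
  fun_induction csAltRunEnd s j with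
  | case1 j h h2 ih => omega
  | case2 j h h2 => omega
  | case3 j h => omega

-- outer while of B's 2-run pass: 6*(j-i) per maximal run of '2's from i to j
def csAltTwos (s : List Char) (i : Nat) (acc : Int) : Int :=
  if h : i < s.length then
    if s[i] = '2' then
      let j := csAltRunEnd s i
      let acc' := if i < j then acc + 6 * ((j : Int) - (i : Int)) else acc
      csAltTwos s (j + 1) acc'
    else csAltTwos s (i + 1) acc
  else acc
termination_by s.length - i
decreasing_by
  · have := csAltRunEnd_ge s i; omega
  · omega

-- B's last pass: `for k in range(1, n)` over adjacent digit pairs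
def csAltPow (ds : List Int) (k : Nat) (run acc : Int) : Int :=
  if h : k < ds.length then
    if ds.getD (k - 1) 0 - ds[k] = 1 then csAltPow ds (k + 1) (run + 1) acc
    else csAltPow ds (k + 1) 1 (acc + run * run)
  else acc + run * run
termination_by ds.length - k

def compute_number_score_alt (number : Int) : Int :=
  let ans0 : Int := if PySem.Int.mod number 3 = 0 then 4 else 0
  let s := PySem.Int.toChars number
  let digits := s.map pyDigit
  let ans1 := ans0 + 5 * (s.count '7' : Int)
  let ans2 := ans1 + 3 * ((digits.filter (fun d => PySem.Int.mod d 2 = 0)).length : Int)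
  let ans3 := csAltTwos s 0 ans2
  csAltPow digits 1 1 ans3

-- ===== PRECONDITION & SPEC =====
-- Pre_ excludes negative numbers: str(number) starts with '-' and int('-') raises ValueError in A (and in B).
def Pre_compute_number_score (number : Int) : Prop := 0 ≤ number
instance (number : Int) : Decidable (Pre_compute_number_score number) := by unfold Pre_compute_number_score; infer_instance

def pvWitness_compute_number_score : Int := (27)

-- On numbers whose decimal form starts with a run of at least two twos that does not cover the
-- whole string, A's falsy check of c2PointerLeft at index zero silently drops that run's bonus of
-- six per extra two, so A returns a lower score; B scores every maximal run of twos uniformly,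
-- which is the evident intent.
def D_compute_number_score (number : Int) : Prop :=
  2 ≤ (PySem.Int.toChars number).length ∧
  (PySem.Int.toChars number).getD 0 ' ' = '2' ∧
  (PySem.Int.toChars number).getD 1 ' ' = '2' ∧
  (PySem.Int.toChars number).count '2' ≠ (PySem.Int.toChars number).length
instance (number : Int) : Decidable (D_compute_number_score number) := by
  unfold D_compute_number_score; infer_instance

def Spec_compute_number_score (number : Int) (out : Int) : Prop :=
  ¬ D_compute_number_score number → out = compute_number_score_alt number
instance (number : Int) (out : Int) : Decidable (Spec_compute_number_score number out) := by
  unfold Spec_compute_number_score; infer_instance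

def pvDiffWitness_compute_number_score : Int := (221)
def pvDiffWitnessOut_compute_number_score : Int × Int := (11, 17)

-- ===== CLAIM (what is proved, stated in full; the proofs are below) =====
def Claim_unchanged_compute_number_score : Prop := ∀ (number : Int), Dom_compute_number_score number → Pre_compute_number_score number → Spec_compute_number_score number (compute_number_score number)
def Claim_changed_compute_number_score : Prop := Dom_compute_number_score (pvDiffWitness_compute_number_score) ∧ Pre_compute_number_score (pvDiffWitness_compute_number_score) ∧ D_compute_number_score (pvDiffWitness_compute_number_score) ∧ compute_number_score (pvDiffWitness_compute_number_score) = pvDiffWitnessOut_compute_number_score.1 ∧ compute_number_score_alt (pvDiffWitness_compute_number_score) = pvDiffWitnessOut_compute_number_score.2 ∧ pvDiffWitnessOut_compute_number_score.1 ≠ pvDiffWitnessOut_compute_number_score.2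
def Claim_exact_compute_number_score : Prop := ∀ (number : Int), Dom_compute_number_score number → Pre_compute_number_score number → D_compute_number_score number → compute_number_score number ≠ compute_number_score_alt number

-- ===== LEMMAS AND PROOFS =====

-- proof-side split of A's fused loop into its three independent accumulations
def A7e (s : List Char) (i : Nat) : Int :=
  if h : i < s.length then
    (if s[i] = '7' then 5 else 0) + (if PySem.Int.mod (pyDigit s[i]) 2 = 0 then 3 else 0) + A7e s (i + 1)
  else 0
termination_by s.length - i

def A2 (s : List Char) (i : Nat) (c2L c2R : Option Nat) : Int :=
  if h : i < s.length then
    if s[i] = '2' then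
      match c2L with
      | none => A2 s (i + 1) (some i) c2R
      | some l => A2 s (i + 1) (some l) (some i)
    else
      flushMid c2L c2R + A2 s (i + 1) none none
  else flushEnd c2L c2R
termination_by s.length - i

def APow (s : List Char) (i : Nat) (pp : Nat) (pl : Int) : Int :=
  if h : i < s.length then
    if pyDigit (s.getD pp ' ') - pyDigit s[i] = 1 then APow s (i + 1) i (pl + 1)
    else if i ≠ 0 then pl ^ 2 + APow s (i + 1) i 1
    else APow s (i + 1) i pl
  else pl ^ 2
termination_by s.length - i

theorem A2_step_two_none {s : List Char} {i : Nat} (c2R : Option Nat) (h : i < s.length) (h2 : s[i] = '2') :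
    A2 s i none c2R = A2 s (i + 1) (some i) c2R := by
  rw [A2.eq_def]; simp [h, h2]

theorem A2_step_two_some {s : List Char} {i : Nat} (l : Nat) (c2R : Option Nat) (h : i < s.length) (h2 : s[i] = '2') :
    A2 s i (some l) c2R = A2 s (i + 1) (some l) (some i) := by
  rw [A2.eq_def]; simp [h, h2]

theorem A2_step_other {s : List Char} {i : Nat} (c2L c2R : Option Nat) (h : i < s.length) (h2 : ¬ s[i] = '2') :
    A2 s i c2L c2R = flushMid c2L c2R + A2 s (i + 1) none none := by
  rw [A2.eq_def]; simp [h, h2]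

theorem A2_base {s : List Char} {i : Nat} (c2L c2R : Option Nat) (h : ¬ i < s.length) :
    A2 s i c2L c2R = flushEnd c2L c2R := by
  rw [A2.eq_def]; simp [h]

set_option maxHeartbeats 1000000 in
theorem csLoopA_decomp (s : List Char) (i : Nat) (ans : Int) (c2L c2R : Option Nat) (pp : Nat) (pl : Int) :
    csLoopA s i ans c2L c2R pp pl = ans + A7e s i + A2 s i c2L c2R + APow s i pp pl := by
  fun_induction csLoopA s i ans c2L c2R pp pl with
  | case1 i ans c2L c2R pp pl h c ans1 ans2 c2L' c2R' cond ans3 pl' ans4 ih =>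
    rw [ih]
    conv_rhs => rw [A7e, APow]
    by_cases h2 : s[i] = '2'
    · rcases c2L with _ | l
      · conv_rhs => rw [A2_step_two_none c2R h h2]
        simp only [c, ans4, ans3, ans2, ans1, c2L', c2R', pl', cond, upd2L, upd2R]
        split_ifs <;> ring
      · conv_rhs => rw [A2_step_two_some l c2R h h2]
        simp only [c, ans4, ans3, ans2, ans1, c2L', c2R', pl', cond, upd2L, upd2R]
        split_ifs <;> ring
    · conv_rhs => rw [A2_step_other c2L c2R h h2]
      simp only [c, ans4, ans3, ans2, ans1, c2L', c2R', pl', cond, upd2L, upd2R]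
      split_ifs <;> ring
  | case2 i ans c2L c2R pp pl h =>
    rw [A7e, APow, A2_base c2L c2R h]
    simp only [dif_neg h]
    ring

theorem A7e_eq (s : List Char) (i : Nat) :
    A7e s i = 5 * ((s.drop i).count '7' : Int)
      + 3 * ((((s.drop i).map pyDigit).filter (fun d => PySem.Int.mod d 2 = 0)).length : Int) := by
  fun_induction A7e s i with
  | case1 i h ih =>
    rw [List.drop_eq_getElem_cons h]
    simp only [List.count_cons, List.map_cons, List.filter_cons, ih]
    split_ifs with h1 h2 <;> simp_all <;> ring
  | case2 i h =>
    rw [List.drop_eq_nil_of_le (by omega)]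
    simp

-- A's 2-run contribution: the run from l through csAltRunEnd s j, with A's truthiness guard
theorem A2_run (s : List Char) (j l : Nat) (hj : j < s.length) (hl : l ≤ j) (h2 : s.getD j ' ' = '2') :
    A2 s (j + 1) (some l) (if l = j then none else some j)
      = (if l < csAltRunEnd s j ∧ (l ≠ 0 ∨ csAltRunEnd s j = s.length - 1)
          then 6 * ((csAltRunEnd s j : Int) - (l : Int)) else 0)
        + A2 s (csAltRunEnd s j + 1) none none := by
  induction hn : s.length - j using Nat.strong_induction_on generalizing j with
  | _ n ih =>
  subst hn
  by_cases hnext : j + 1 < s.length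
  · by_cases h2n : s.getD (j + 1) ' ' = '2'
    · have h2n' : s[j + 1] = '2' := by rwa [List.getD_eq_getElem s ' ' hnext] at h2n
      rw [csAltRunEnd, dif_pos hnext, if_pos h2n']
      rw [A2_step_two_some l _ hnext h2n']
      have := ih (s.length - (j + 1)) (by omega) (j + 1) hnext (by omega) h2n rfl
      rw [if_neg (by omega : ¬ l = j + 1)] at this
      exact this
    · have h2n' : ¬ s[j + 1] = '2' := by rwa [List.getD_eq_getElem s ' ' hnext] at h2n
      rw [csAltRunEnd, dif_pos hnext, if_neg h2n']
      rw [A2_step_other _ _ hnext h2n']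
      conv_rhs => rw [A2_step_other _ _ hnext h2n']
      have hj1 : ¬ (j = s.length - 1) := by omega
      by_cases hlj : l = j
      · rw [if_pos hlj]
        simp only [flushMid]
        rw [if_neg (by omega : ¬ (l < j ∧ (l ≠ 0 ∨ j = s.length - 1)))]
        ring
      · rw [if_neg hlj]
        simp only [flushMid]
        split_ifs <;> [skip; omega; omega; skip] <;> ring
  · rw [csAltRunEnd, dif_neg hnext]
    rw [A2_base _ _ (by omega), A2_base _ _ (by omega)]
    have hlen : j = s.length - 1 := by omega
    by_cases hlj : l = j
    · rw [if_pos hlj]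
      simp only [flushEnd]
      rw [if_neg (by omega : ¬ (l < j ∧ (l ≠ 0 ∨ j = s.length - 1)))]
      ring
    · rw [if_neg hlj]
      simp only [flushEnd]
      rw [if_pos (by omega : l < j ∧ (l ≠ 0 ∨ j = s.length - 1))]
      ring

-- every index covered by the run starting at i holds '2'
theorem csAltRunEnd_all2 (s : List Char) (i : Nat) (h2 : s.getD i ' ' = '2') :
    ∀ k, i ≤ k → k ≤ csAltRunEnd s i → s.getD k ' ' = '2' := by
  fun_induction csAltRunEnd s i with
  | case1 j h hx ih =>
    intro k hk1 hk2
    rcases Nat.eq_or_lt_of_le hk1 with rfl | hlt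
    · exact h2
    · exact ih (by rw [List.getD_eq_getElem s ' ' h]; exact hx) k (by omega) hk2
  | case2 j h hx =>
    intro k hk1 hk2
    have : k = j := by omega
    subst this; exact h2
  | case3 j h =>
    intro k hk1 hk2
    have : k = j := by omega
    subst this; exact h2

-- a positive run end at 0 forces s[1] = '2'
theorem csAltRunEnd_zero_pos (s : List Char) (h : 1 ≤ csAltRunEnd s 0) :
    1 < s.length ∧ s.getD 1 ' ' = '2' := by
  rw [csAltRunEnd] at h
  by_cases hl : 0 + 1 < s.length
  · rw [dif_pos hl] at h
    by_cases h2 : s[0 + 1] = '2'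
    · exact ⟨by omega, by rw [List.getD_eq_getElem s ' ' (by omega : 1 < s.length)]; simpa using h2⟩
    · rw [if_neg h2] at h; omega
  · rw [dif_neg hl] at h; omega

theorem csAltTwos_step2 {s : List Char} {i : Nat} (acc : Int) (h : i < s.length) (h2 : s[i] = '2') :
    csAltTwos s i acc = csAltTwos s (csAltRunEnd s i + 1)
      (if i < csAltRunEnd s i then acc + 6 * ((csAltRunEnd s i : Int) - (i : Int)) else acc) := by
  rw [csAltTwos]; simp [h, h2]

theorem csAltTwos_step_other {s : List Char} {i : Nat} (acc : Int) (h : i < s.length) (h2 : ¬ s[i] = '2') :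
    csAltTwos s i acc = csAltTwos s (i + 1) acc := by
  rw [csAltTwos]; simp [h, h2]

theorem csAltTwos_base {s : List Char} {i : Nat} (acc : Int) (h : ¬ i < s.length) :
    csAltTwos s i acc = acc := by
  rw [csAltTwos]; simp [h]

-- A's 2-pass = B's 2-pass from any index ≥ 1 (the truthiness guard is vacuous there)
theorem A2_top_ge1 (s : List Char) (i : Nat) (acc : Int) (hi : 1 ≤ i) :
    A2 s i none none + acc = csAltTwos s i acc := by
  revert hi
  induction hn : s.length - i using Nat.strong_induction_on generalizing i acc with
  | _ n ih =>
  intro hi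
  subst hn
  by_cases h : i < s.length
  · by_cases h2 : s[i] = '2'
    · rw [A2_step_two_none _ h h2]
      have hrun := A2_run s i i h (le_refl i) (by rwa [List.getD_eq_getElem s ' ' h])
      rw [if_pos rfl] at hrun
      rw [hrun]
      rw [csAltTwos_step2 _ h h2]
      have hge := csAltRunEnd_ge s i
      have := ih (s.length - (csAltRunEnd s i + 1)) (by omega) (csAltRunEnd s i + 1)
        (if i < csAltRunEnd s i then acc + 6 * ((csAltRunEnd s i : Int) - (i : Int)) else acc) rfl (by omega)
      rw [← this]
      split_ifs <;> [skip; omega; omega; skip] <;> ring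
    · rw [A2_step_other _ _ h h2]
      rw [csAltTwos_step_other _ h h2]
      rw [← ih (s.length - (i + 1)) (by omega) (i + 1) acc rfl (by omega)]
      simp only [flushMid]
      ring
  · rw [A2_base _ _ h, csAltTwos_base _ h]
    simp only [flushEnd]
    ring

-- the run stops: the char after csAltRunEnd is not '2' (or the string ends)
theorem csAltRunEnd_stop (s : List Char) (i : Nat) :
    ¬ (csAltRunEnd s i + 1 < s.length) ∨ s.getD (csAltRunEnd s i + 1) ' ' ≠ '2' := by
  fun_induction csAltRunEnd s i with
  | case1 j h hx ih => exact ih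
  | case2 j h hx =>
    right
    rw [List.getD_eq_getElem s ' ' h]
    exact hx
  | case3 j h => left; exact h

theorem csAltRunEnd_lt (s : List Char) (i : Nat) : i < s.length → csAltRunEnd s i < s.length := by
  fun_induction csAltRunEnd s i with
  | case1 j hlt hx ih => intro _; exact ih hlt
  | case2 j hlt hx => intro h; exact h
  | case3 j hlt => intro h; exact h

-- under D_'s facts, the first run has positive length and stops before the end
theorem first_run_facts (s : List Char) (hlen : 2 ≤ s.length)
    (h0 : s.getD 0 ' ' = '2') (h1 : s.getD 1 ' ' = '2')
    (hnall : ¬ (∀ c ∈ s, c = '2')) :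
    1 ≤ csAltRunEnd s 0 ∧ csAltRunEnd s 0 ≠ s.length - 1 := by
  have hl0 : 0 < s.length := by omega
  have hj1 : 1 ≤ csAltRunEnd s 0 := by
    rw [csAltRunEnd, dif_pos (by omega : 0 + 1 < s.length)]
    rw [if_pos (by rw [← List.getD_eq_getElem s ' ' (by omega : 0 + 1 < s.length)]; exact h1)]
    have := csAltRunEnd_ge s (0 + 1)
    omega
  refine ⟨hj1, fun hend => hnall ?_⟩
  intro c hc
  obtain ⟨k, hk, rfl⟩ := List.getElem_of_mem hc
  have := csAltRunEnd_all2 s 0 h0 k (by omega) (by omega)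
  rwa [List.getD_eq_getElem s ' ' hk] at this

-- outside D_'s shape, the 2-passes also agree from index 0
theorem A2_top_zero (s : List Char) (acc : Int)
    (H : 2 ≤ s.length → s.getD 0 ' ' = '2' → s.getD 1 ' ' = '2' → ∀ c ∈ s, c = '2') :
    A2 s 0 none none + acc = csAltTwos s 0 acc := by
  by_cases h : 0 < s.length
  · by_cases h2 : s[0] = '2'
    · rw [A2_step_two_none _ h h2]
      have hrun := A2_run s 0 0 h (le_refl 0) (by rwa [List.getD_eq_getElem s ' ' h])
      rw [if_pos rfl] at hrun
      rw [hrun]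
      rw [csAltTwos_step2 _ h h2]
      set j := csAltRunEnd s 0 with hjdef
      rw [← A2_top_ge1 s (j + 1) _ (by omega)]
      by_cases hj : 0 < j
      · obtain ⟨hl1, hs1⟩ := csAltRunEnd_zero_pos s (by omega)
        have hall := H (by omega) (by rwa [List.getD_eq_getElem s ' ' h]) hs1
        have hjlt : j < s.length := csAltRunEnd_lt s 0 h
        have hjend : j = s.length - 1 := by
          rcases csAltRunEnd_stop s 0 with hst | hst
          · omega
          · by_contra hne
            have hnext : j + 1 < s.length := by omega
            exact hst (by rw [List.getD_eq_getElem s ' ' hnext]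
                          exact hall _ (List.getElem_mem hnext))
        rw [if_pos (by omega : (0:Nat) < j ∧ ((0:Nat) ≠ 0 ∨ j = s.length - 1))]
        rw [if_pos hj]
        ring
      · have hj0 : j = 0 := by have := csAltRunEnd_ge s 0; omega
        rw [if_neg (by omega : ¬ ((0:Nat) < j ∧ ((0:Nat) ≠ 0 ∨ j = s.length - 1)))]
        rw [if_neg (by omega : ¬ (0 < j))]
        ring
    · rw [A2_step_other _ _ h h2]
      rw [csAltTwos_step_other _ h h2]
      rw [← A2_top_ge1 s 1 acc (le_refl 1)]
      simp only [flushMid]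
      ring
  · rw [A2_base _ _ h, csAltTwos_base _ h]
    simp only [flushEnd]
    ring

-- inside D_'s shape, B's 2-pass exceeds A's by the dropped bonus 6*j
theorem A2_top_zero_D (s : List Char) (acc : Int) (hlen : 2 ≤ s.length)
    (h0 : s.getD 0 ' ' = '2') (h1 : s.getD 1 ' ' = '2')
    (hnall : ¬ (∀ c ∈ s, c = '2')) :
    csAltTwos s 0 acc = A2 s 0 none none + acc + 6 * (csAltRunEnd s 0 : Int) := by
  obtain ⟨hj1, hjend⟩ := first_run_facts s hlen h0 h1 hnall
  have h : 0 < s.length := by omega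
  have h2 : s[0] = '2' := by rwa [List.getD_eq_getElem s ' ' h] at h0
  rw [A2_step_two_none _ h h2]
  have hrun := A2_run s 0 0 h (le_refl 0) h0
  rw [if_pos rfl] at hrun
  rw [hrun]
  rw [if_neg (by omega : ¬ ((0:Nat) < csAltRunEnd s 0 ∧ ((0:Nat) ≠ 0 ∨ csAltRunEnd s 0 = s.length - 1)))]
  rw [csAltTwos_step2 _ h h2]
  rw [if_pos (by omega : 0 < csAltRunEnd s 0)]
  rw [← A2_top_ge1 s (csAltRunEnd s 0 + 1) _ (by omega)]
  push_cast
  ring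

theorem APow_eq (s : List Char) (i : Nat) (pl acc : Int) (hi : 1 ≤ i) :
    APow s i (i - 1) pl + acc = csAltPow (s.map pyDigit) i pl acc := by
  fun_induction csAltPow (s.map pyDigit) i pl acc with
  | case1 k run acc h hc ih =>
    have hk : k < s.length := by simpa using h
    have hk1 : k - 1 < s.length := by omega
    have hgd : (List.map pyDigit s).getD (k - 1) 0 = pyDigit (s.getD (k - 1) ' ') := by
      simp [List.getD_eq_getElem?_getD, hk1]
    rw [hgd] at hc
    simp only [List.getElem_map] at hc
    rw [APow, dif_pos hk, if_pos hc]
    simpa using ih (by omega)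
  | case2 k run acc h hc ih =>
    have hk : k < s.length := by simpa using h
    have hk1 : k - 1 < s.length := by omega
    have hgd : (List.map pyDigit s).getD (k - 1) 0 = pyDigit (s.getD (k - 1) ' ') := by
      simp [List.getD_eq_getElem?_getD, hk1]
    rw [hgd] at hc
    simp only [List.getElem_map] at hc
    rw [APow, dif_pos hk, if_neg hc, if_pos (by omega : k ≠ 0)]
    have := ih (by omega)
    simp only [Nat.add_sub_cancel] at this ⊢
    rw [← this]; ring
  | case3 k run acc h => rw [APow]; simp only [List.length_map] at h; rw [dif_neg h]; ring

theorem APow_zero_one (s : List Char) : APow s 0 0 1 = APow s 1 0 1 := by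
  by_cases h : 0 < s.length
  · rw [APow, dif_pos h]
    rw [List.getD_eq_getElem s ' ' h]
    simp
  · rw [APow, dif_neg (by omega), APow, dif_neg (by omega)]

-- both programs decomposed over the shared core
theorem decomp_A (number : Int) :
    compute_number_score number
      = ((if PySem.Int.mod number 3 = 0 then (4:Int) else 0) + A7e (PySem.Int.toChars number) 0)
        + A2 (PySem.Int.toChars number) 0 none none + APow (PySem.Int.toChars number) 1 0 1 := by
  simp only [compute_number_score]
  rw [csLoopA_decomp, APow_zero_one]

theorem decomp_B (number : Int) :
    compute_number_score_alt number
      = csAltTwos (PySem.Int.toChars number) 0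
          ((if PySem.Int.mod number 3 = 0 then (4:Int) else 0) + A7e (PySem.Int.toChars number) 0)
        + APow (PySem.Int.toChars number) 1 0 1 := by
  simp only [compute_number_score_alt]
  rw [← APow_eq _ 1 1 _ (le_refl 1)]
  rw [A7e_eq _ 0]
  simp only [List.drop_zero, Nat.sub_self]
  ring_nf


-- evaluation of both ports at the difference witness 221
set_option maxHeartbeats 1000000 in
theorem evalA7e : A7e ['2','2','1'] 0 = 6 := by
  repeat (rw [A7e.eq_def]; norm_num)
  decide

set_option maxHeartbeats 1000000 in
theorem evalAPow : APow ['2','2','1'] 1 0 1 = 5 := by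
  repeat (rw [APow.eq_def]; norm_num)
  decide

set_option maxHeartbeats 1000000 in
theorem evalA2 : A2 ['2','2','1'] 0 none none = 0 := by
  rw [A2_step_two_none (s:=['2','2','1']) (i:=0) _ (by norm_num) (by decide)]
  rw [A2_step_two_some (s:=['2','2','1']) (i:=1) _ _ (by norm_num) (by decide)]
  rw [A2_step_other (s:=['2','2','1']) (i:=2) _ _ (by norm_num) (by decide)]
  rw [A2_base (s:=['2','2','1']) (i:=3) _ _ (by norm_num)]
  all_goals decide

set_option maxHeartbeats 1000000 in
theorem evalRE : csAltRunEnd ['2','2','1'] 0 = 1 := by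
  rw [csAltRunEnd.eq_def]; norm_num
  rw [csAltRunEnd.eq_def]; norm_num
  all_goals decide

set_option maxHeartbeats 1000000 in
theorem evalTwos : csAltTwos ['2','2','1'] 0 6 = 12 := by
  rw [csAltTwos_step2 (s:=['2','2','1']) (i:=0) _ (by norm_num) (by decide), evalRE]
  norm_num
  rw [csAltTwos_step_other (s:=['2','2','1']) (i:=2) _ (by norm_num) (by decide)]
  rw [csAltTwos_base (s:=['2','2','1']) (i:=3) _ (by norm_num)]

set_option maxHeartbeats 1000000 in
theorem evalA : compute_number_score 221 = 11 := by
  rw [decomp_A]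
  rw [show PySem.Int.toChars 221 = ['2','2','1'] from by decide]
  rw [show PySem.Int.mod 221 3 = 2 from by decide]
  rw [evalA7e, evalA2, evalAPow]
  norm_num

set_option maxHeartbeats 1000000 in
theorem evalB : compute_number_score_alt 221 = 17 := by
  rw [decomp_B]
  rw [show PySem.Int.toChars 221 = ['2','2','1'] from by decide]
  rw [show PySem.Int.mod 221 3 = 2 from by decide]
  rw [evalA7e]
  norm_num
  rw [evalTwos, evalAPow]
  norm_num

-- ===== VERDICT (by name: the statement is the Claim_ definition above) =====
theorem compute_number_score_spec : Claim_unchanged_compute_number_score := by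
  intro number _ _ hnD
  rw [decomp_A, decomp_B]
  rw [← A2_top_zero]
  · ring
  · intro hlen h0 h1
    have hcnt : (PySem.Int.toChars number).count '2' = (PySem.Int.toChars number).length := by
      by_contra hne
      exact hnD ⟨hlen, h0, h1, hne⟩
    intro c hc
    exact (List.count_eq_length.mp hcnt c hc).symm

set_option maxRecDepth 10000 in
theorem compute_number_score_changed : Claim_changed_compute_number_score := by
  unfold Claim_changed_compute_number_score
  exact ⟨by decide, by decide, by decide, evalA, evalB, by decide⟩

theorem compute_number_score_tight : Claim_exact_compute_number_score := by
  intro number _ _ hD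
  obtain ⟨hlen, h0, h1, hcnt⟩ := hD
  have hnall : ¬ (∀ c ∈ PySem.Int.toChars number, c = '2') := fun hall =>
    hcnt (List.count_eq_length.mpr (fun b hb => (hall b hb).symm))
  rw [decomp_A, decomp_B]
  rw [A2_top_zero_D _ _ hlen h0 h1 hnall]
  obtain ⟨hj1, _⟩ := first_run_facts _ hlen h0 h1 hnall
  have : (1:Int) ≤ (csAltRunEnd (PySem.Int.toChars number) 0 : Int) := by exact_mod_cast hj1
  intro heq
  omega
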